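-- pv_equiv track=rewrite | github.com/SauravSinha76/scaler | class43/add_or_not.py | solve
-- ===== SOURCE A (Python) =====
-- def solve(A,B):
--     A.sort()
--     n = len(A)
--     ans= [-1,-1]
--     psum =[0,A[0]]
--     for i in range(1,n):
--         psum.append(psum[i]+A[i])
--     for i in range(n):
--         count = 0
--         ops = B
--         for j in range(i,-1,-1):
--             if A[i] * (i - j +1) - (psum[i+1] - psum[j]) <= ops:
--                 count = i - j +1
--             if count > ans[0]:
--                 ans[0] = count
--                 ans[1] = A[i]
--     return ans
-- ===== SOURCE B (Python) =====
-- def solve(A, B):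
--     # Sorts A in place like the original; O(n log n): per element, binary-search
--     # the leftmost window start whose raise-to-A[i] cost fits in the budget.
--     A.sort()
--     psum = [0]
--     for x in A:
--         psum.append(psum[-1] + x)
--     best, val = -1, -1
--     for i, a in enumerate(A):
--         lo, hi = 0, i + 1  # least j in [0, i] with cost <= B, or i+1 if none
--         while lo < hi:
--             mid = (lo + hi) // 2
--             if a * (i - mid + 1) - (psum[i + 1] - psum[mid]) <= B:
--                 hi = mid
--             else:
--                 lo = mid + 1
--         cnt = i - lo + 1
--         if cnt > best:
--             best, val = cnt, a
--     return [best, val]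
-- ===== Notes on version B (the rewrite author's own statement) =====
-- stated objective: faster
-- what changed: A's O(n^2) backward inner scan per element is replaced by a per-element binary search over prefix sums for the leftmost window start whose raise-to-A[i] cost fits the budget (cost is monotone on the sorted list), giving O(n log n) after the sort.
import Mathlib
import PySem

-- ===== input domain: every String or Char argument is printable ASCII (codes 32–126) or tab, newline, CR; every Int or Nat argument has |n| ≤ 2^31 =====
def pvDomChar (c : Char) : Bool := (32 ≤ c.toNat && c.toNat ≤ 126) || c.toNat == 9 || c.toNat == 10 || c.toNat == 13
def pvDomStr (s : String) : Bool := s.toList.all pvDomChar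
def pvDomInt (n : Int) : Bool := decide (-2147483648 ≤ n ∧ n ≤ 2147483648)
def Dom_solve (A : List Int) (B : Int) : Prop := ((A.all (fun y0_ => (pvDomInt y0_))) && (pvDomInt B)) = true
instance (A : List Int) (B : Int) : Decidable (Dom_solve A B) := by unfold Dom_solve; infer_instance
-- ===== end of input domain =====

-- B replaces A's O(n^2) inner backward scan by a per-element binary search for the
-- leftmost affordable window start (cost is monotone on the sorted list), O(n log n).
-- Both Pythons sort A in place; the equivalence proved here is about the RETURN value.

-- ===== PORT A =====
def solve (A : List Int) (B : Int) : List Int :=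
  let s := PySem.List.sorted A (fun x => x) false
  let n : Int := PySem.List.len s
  let psum0 : List Int := [0, PySem.List.pyGetD s 0 0]
  let psum := (PySem.List.pyRange 1 n 1).foldl
      (fun ps i => ps ++ [PySem.List.pyGetD ps i 0 + PySem.List.pyGetD s i 0]) psum0
  let ans := (PySem.List.pyRange 0 n 1).foldl (fun (ans : Int × Int) i =>
      let ops := B
      let st := (PySem.List.pyRange i (-1) (-1)).foldl (fun (st : Int × (Int × Int)) j =>
          let count := if PySem.List.pyGetD s i 0 * (i - j + 1) -
              (PySem.List.pyGetD psum (i+1) 0 - PySem.List.pyGetD psum j 0) ≤ ops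
            then i - j + 1 else st.1
          let a := if count > st.2.1 then (count, PySem.List.pyGetD s i 0) else st.2
          (count, a)) ((0 : Int), ans)
      st.2) ((-1 : Int), (-1 : Int))
  [ans.1, ans.2]

-- ===== PORT B =====
-- binary-search while-loop of B; fuel = hi - lo at entry bounds the iteration count
def bsGo (fuel : Nat) (a B : Int) (psum : List Int) (i : Int) (lo hi : Int) : Int :=
  match fuel with
  | 0 => lo
  | fuel + 1 =>
    if lo < hi then
      let mid := PySem.Int.floordiv (lo + hi) 2
      if a * (i - mid + 1) - (PySem.List.pyGetD psum (i+1) 0 - PySem.List.pyGetD psum mid 0) ≤ B then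
        bsGo fuel a B psum i lo mid
      else
        bsGo fuel a B psum i (mid + 1) hi
    else lo

def solve_alt (A : List Int) (B : Int) : List Int :=
  let s := PySem.List.sorted A (fun x => x) false
  let psum := s.foldl (fun ps x => ps ++ [PySem.List.pyGetD ps (-1) 0 + x]) [0]
  let r := (PySem.List.enumerate s 0).foldl (fun (bv : Int × Int) p =>
      let lo := bsGo (p.1 + 1).toNat p.2 B psum p.1 0 (p.1 + 1)
      let cnt := p.1 - lo + 1
      if cnt > bv.1 then (cnt, p.2) else bv) ((-1 : Int), (-1 : Int))
  [r.1, r.2]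

-- ===== PRECONDITION & SPEC =====
-- Pre_ excludes only the empty list, on which the Python A raises IndexError (A[0]).
def Pre_solve (A : List Int) (B : Int) : Prop := A ≠ []
instance (A : List Int) (B : Int) : Decidable (Pre_solve A B) := by unfold Pre_solve; infer_instance
def pvWitness_solve : List Int × Int := ([3, -1, 4, 1, 5], 5)

def Spec_solve (A : List Int) (B : Int) (out : List Int) : Prop := out = solve_alt A B
instance (A : List Int) (B : Int) (out : List Int) : Decidable (Spec_solve A B out) := by unfold Spec_solve; infer_instance

-- ===== CLAIM (what is proved, stated in full; the proofs are below) =====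
def Claim_equal_solve : Prop := ∀ (A : List Int) (B : Int), Dom_solve A B → Pre_solve A B → Spec_solve A B (solve A B)

-- ===== LEMMAS AND PROOFS =====

def upd (p : Int × Int) (c v : Int) : Int × Int := if c > p.1 then (c, v) else p

theorem upd_upd (p : Int × Int) (c c' v : Int) (h : c ≤ c') :
    upd (upd p c v) c' v = upd p c' v := by
  unfold upd; split_ifs <;> simp_all <;> omega

def pfx (c : Int) : List Int → List Int
  | [] => []
  | x :: xs => (c + x) :: pfx (c + x) xs

theorem pfx_getD (l : List Int) (c : Int) (k : Nat) (hk : k ≤ l.length) :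
    (c :: pfx c l).getD k 0 = c + (l.take k).sum := by
  induction l generalizing c k with
  | nil =>
    have : k = 0 := by simpa using hk
    subst this; simp
  | cons x xs ih =>
    cases k with
    | zero => simp
    | succ k =>
      have := ih (c + x) k (by simpa using hk)
      simpa [pfx, add_assoc] using this

theorem psum_getD (s : List Int) (k : Int) (h0 : 0 ≤ k) (h1 : k ≤ (s.length : Int)) :
    PySem.List.pyGetD (0 :: pfx 0 s) k 0 = (s.take k.toNat).sum := by
  have hk : k = ((k.toNat : Nat) : Int) := by omega
  rw [hk, PySem.List.pyGetD_natCast, pfx_getD s 0 k.toNat (by omega)]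
  have : (max k 0).toNat = k.toNat := by omega
  simp [this]

theorem psumB_aux (l : List Int) : ∀ (ps : List Int) (h : ps ≠ []),
    l.foldl (fun ps x => ps ++ [PySem.List.pyGetD ps (-1) 0 + x]) ps = ps ++ pfx (ps.getLast h) l := by
  induction l with
  | nil => intro ps h; simp [pfx]
  | cons x xs ih =>
    intro ps h
    simp only [List.foldl_cons]
    rw [PySem.List.pyGetD_neg_one (h := h)]
    have h2 : ps ++ [ps.getLast h + x] ≠ [] := by simp
    rw [ih _ h2]
    have : (ps ++ [ps.getLast h + x]).getLast h2 = ps.getLast h + x := by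
      simp
    rw [this]
    simp [pfx]

theorem psumB_eq (s : List Int) :
    s.foldl (fun ps x => ps ++ [PySem.List.pyGetD ps (-1) 0 + x]) [0] = 0 :: pfx 0 s := by
  have := psumB_aux s [0] (by simp)
  simpa using this

-- generalized invariant for A's psum loop
theorem psumA_aux (s : List Int) (hs : s ≠ []) :
    ∀ (m : Nat), 1 ≤ m → m ≤ s.length →
    (PySem.List.pyRange 1 (m : Int) 1).foldl
      (fun ps i => ps ++ [PySem.List.pyGetD ps i 0 + PySem.List.pyGetD s i 0])
      [0, PySem.List.pyGetD s 0 0] = 0 :: pfx 0 (s.take m) := by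
  intro m
  induction m with
  | zero => omega
  | succ m ih =>
    intro _ hm
    rcases Nat.eq_or_lt_of_le (Nat.one_le_iff_ne_zero.mpr (Nat.succ_ne_zero m)) with h1 | h1
    · -- m + 1 = 1
      have hm0 : m = 0 := by omega
      subst hm0
      obtain ⟨y, t, rfl⟩ := List.exists_cons_of_ne_nil hs
      rw [show ((1 : Nat) : Int) = 1 by norm_num]
      rw [PySem.List.pyRange_one_eq_nil (by omega)]
      simp [pfx, PySem.List.pyGetD_zero_cons]
    · -- step: 1 ≤ m
      have hm1 : 1 ≤ m := by omega
      have hmn : m ≤ s.length := by omega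
      have hrange : PySem.List.pyRange 1 ((m : Nat) + 1 : Int) 1
          = PySem.List.pyRange 1 (m : Int) 1 ++ [(m : Int)] :=
        PySem.List.pyRange_one_succ_right (by exact_mod_cast Nat.one_le_cast.mpr hm1)
      rw [show (((m + 1 : Nat)) : Int) = ((m : Nat) : Int) + 1 by push_cast; ring, hrange,
        List.foldl_append, ih hm1 hmn]
      simp only [List.foldl_cons, List.foldl_nil]
      -- index m into 0 :: pfx 0 (s.take m): it is the last entry, sum of first m
      have hlen : (s.take m).length = m := by simp [Nat.min_eq_left hmn]
      have hget1 : PySem.List.pyGetD (0 :: pfx 0 (s.take m)) ((m : Nat) : Int) 0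
          = ((s.take m).take m).sum := by
        rw [PySem.List.pyGetD_natCast]
        exact pfx_getD (s.take m) 0 m (by omega) |>.trans (by ring)
      have hget2 : PySem.List.pyGetD s ((m : Nat) : Int) 0 = s.getD m 0 :=
        PySem.List.pyGetD_natCast s m 0
      rw [hget1, hget2]
      -- now a list identity: 0 :: pfx 0 (take m) ++ [sum + s[m]] = 0 :: pfx 0 (take (m+1))
      have key : ∀ (l : List Int) (c : Int) (k : Nat), k < l.length →
          (c :: pfx c (l.take k)) ++ [c + ((l.take k).sum) + l.getD k 0]
            = c :: pfx c (l.take (k+1)) := by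
        intro l c k
        induction l generalizing c k with
        | nil => intro h; simp at h
        | cons x xs ihl =>
          intro hk
          cases k with
          | zero => simp [pfx]
          | succ k =>
            have := ihl (c + x) k (by simpa using hk)
            simp only [List.take_succ_cons, pfx, List.cons_append, List.cons.injEq, true_and]
            have h2 : c + (x :: xs.take k).sum + (x :: xs).getD (k+1) 0
                = c + x + (xs.take k).sum + xs.getD k 0 := by
              simp [add_assoc]
            rw [h2]
            have := congrArg List.tail this
            simpa using this
      have := key s 0 m (by omega)
      simp only [List.take_take, Nat.min_self] at hget1 ⊢
      rw [show (0 : Int) + (s.take m).sum + s.getD m 0 = (s.take m).sum + s.getD m 0 by ring] at this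
      rw [← this]

theorem psumA_eq (s : List Int) (hs : s ≠ []) :
    (PySem.List.pyRange 1 (PySem.List.len s) 1).foldl
      (fun ps i => ps ++ [PySem.List.pyGetD ps i 0 + PySem.List.pyGetD s i 0])
      [0, PySem.List.pyGetD s 0 0] = 0 :: pfx 0 s := by
  have h := psumA_aux s hs s.length (List.length_pos_iff.mpr hs) le_rfl
  rw [PySem.List.len_eq]
  simpa using h

def wcond (a B : Int) (psum : List Int) (i j : Int) : Prop :=
  a * (i - j + 1) - (PySem.List.pyGetD psum (i+1) 0 - PySem.List.pyGetD psum j 0) ≤ B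
theorem wcond_mono (s : List Int) (B i : Int) (hs : s.Pairwise (· ≤ ·))
    (hi0 : 0 ≤ i) (hin : i < (s.length : Int)) :
    ∀ j, 0 ≤ j → j < i →
      wcond (PySem.List.pyGetD s i 0) B (0 :: pfx 0 s) i j →
      wcond (PySem.List.pyGetD s i 0) B (0 :: pfx 0 s) i (j+1) := by
  intro j hj0 hji hc
  unfold wcond at hc ⊢
  rw [psum_getD s (i+1) (by omega) (by omega), psum_getD s j (by omega) (by omega)] at hc
  rw [psum_getD s (i+1) (by omega) (by omega), psum_getD s (j+1) (by omega) (by omega)]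
  have hjn : j.toNat < s.length := by omega
  have hj1 : (j+1).toNat = j.toNat + 1 := by omega
  rw [hj1, List.sum_take_succ s j.toNat hjn]
  have ha : PySem.List.pyGetD s i 0 = s[i.toNat] :=
    PySem.List.pyGetD_eq_getElem _ _ (by omega) (by exact_mod_cast hin)
  have hle : s[j.toNat] ≤ s[i.toNat] :=
    (List.pairwise_iff_getElem.mp hs) j.toNat i.toNat hjn (by omega) (by omega)
  rw [ha] at hc ⊢
  have hexp : s[i.toNat] * (i - (j+1) + 1) = s[i.toNat] * (i - j + 1) - s[i.toNat] := by ring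
  rw [hexp]
  linarith

theorem wcond_upclosed (a B : Int) (psum : List Int) (i : Int)
    (mono : ∀ j, 0 ≤ j → j < i → wcond a B psum i j → wcond a B psum i (j+1)) :
    ∀ (d : Nat) (j : Int), 0 ≤ j → j + d ≤ i → wcond a B psum i j → wcond a B psum i (j + d) := by
  intro d
  induction d with
  | zero => intro j _ _ h; simpa using h
  | succ d ih =>
    intro j hj0 hjd hc
    have h1 : wcond a B psum i (j + d) := ih j hj0 (by omega) hc
    have h2 := mono (j + d) (by omega) (by push_cast at hjd; omega) h1
    rw [show ((d + 1 : Nat) : Int) = (d : Int) + 1 by push_cast; ring]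
    rw [show j + ((d : Int) + 1) = (j + d) + 1 by ring]
    exact h2

theorem bsGo_spec (a B : Int) (psum : List Int) (i : Int)
    (mono : ∀ j, 0 ≤ j → j < i → wcond a B psum i j → wcond a B psum i (j+1)) :
    ∀ (fuel : Nat) (lo hi : Int), (hi - lo).toNat ≤ fuel → 0 ≤ lo → lo ≤ hi → hi ≤ i + 1 →
      (∀ j, 0 ≤ j → j < lo → ¬ wcond a B psum i j) → (hi ≤ i → wcond a B psum i hi) →
      lo ≤ bsGo fuel a B psum i lo hi ∧ bsGo fuel a B psum i lo hi ≤ hi ∧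
      (∀ j, 0 ≤ j → j < bsGo fuel a B psum i lo hi → ¬ wcond a B psum i j) ∧
      (bsGo fuel a B psum i lo hi ≤ i → wcond a B psum i (bsGo fuel a B psum i lo hi)) := by
  intro fuel
  induction fuel with
  | zero =>
    intro lo hi hfuel h0 hlh hhi hbelow hhicond
    have : hi = lo := by omega
    subst this
    simp only [bsGo]
    exact ⟨le_refl _, le_refl _, hbelow, hhicond⟩
  | succ fuel ih =>
    intro lo hi hfuel h0 hlh hhi hbelow hhicond
    simp only [bsGo]
    by_cases hlt : lo < hi
    · simp only [if_pos hlt]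
      have hmid : PySem.Int.floordiv (lo + hi) 2 = (lo + hi) / 2 :=
        PySem.Int.floordiv_eq_ediv_of_pos (by omega)
      have hm1 : lo ≤ PySem.Int.floordiv (lo + hi) 2 := by rw [hmid]; omega
      have hm2 : PySem.Int.floordiv (lo + hi) 2 < hi := by rw [hmid]; omega
      set mid := PySem.Int.floordiv (lo + hi) 2 with hmiddef
      by_cases hcm : a * (i - mid + 1) - (PySem.List.pyGetD psum (i+1) 0 - PySem.List.pyGetD psum mid 0) ≤ B
      · simp only [if_pos hcm]
        obtain ⟨q1, q2, q3, q4⟩ := ih lo mid (by omega) h0 hm1 (by omega) hbelow (fun _ => hcm)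
        exact ⟨q1, by omega, q3, q4⟩
      · simp only [if_neg hcm]
        have hbelow' : ∀ j, 0 ≤ j → j < mid + 1 → ¬ wcond a B psum i j := by
          intro j hj0 hjm hc
          by_cases hjlo : j < lo
          · exact hbelow j hj0 hjlo hc
          · -- lo ≤ j ≤ mid; up-close from j to mid
            have : wcond a B psum i mid := by
              have := wcond_upclosed a B psum i mono (mid - j).toNat j hj0 (by omega) hc
              rw [show j + ((mid - j).toNat : Int) = mid by omega] at this
              exact this
            exact hcm this
        obtain ⟨q1, q2, q3, q4⟩ := ih (mid + 1) hi (by omega) (by omega) (by omega) hhi hbelow' hhicond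
        exact ⟨by omega, q2, q3, q4⟩
    · simp only [if_neg hlt]
      have : hi = lo := by omega
      subst this
      exact ⟨le_refl _, le_refl _, hbelow, hhicond⟩

theorem innerA (a B : Int) (psum : List Int) (i r : Int)
    (hr0 : 0 ≤ r) (hfeq : ∀ j, 0 ≤ j → j ≤ i → (wcond a B psum i j ↔ r ≤ j)) :
    ∀ (k : Nat), (k : Int) ≤ i + 1 → ∀ (c : Int) (p : Int × Int), 0 ≤ c → c ≤ i - k + 1 →
      (PySem.List.pyRange ((k : Int) - 1) (-1) (-1)).foldl
        (fun (st : Int × (Int × Int)) j =>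
          let count := if a * (i - j + 1) -
              (PySem.List.pyGetD psum (i+1) 0 - PySem.List.pyGetD psum j 0) ≤ B
            then i - j + 1 else st.1
          let a' := if count > st.2.1 then (count, a) else st.2
          (count, a')) (c, p)
      = (if r ≤ (k : Int) - 1 then i - r + 1 else c,
         if k = 0 then p else upd p (if r ≤ (k : Int) - 1 then i - r + 1 else c) a) := by
  intro k
  induction k with
  | zero =>
    intro _ c p _ _
    rw [PySem.List.pyRange_neg_one_eq_nil (by norm_num)]
    simp
    omega
  | succ k ih =>
    intro hk c p hc0 hc1
    have hkk : ((k + 1 : Nat) : Int) - 1 = (k : Int) := by push_cast; ring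
    rw [hkk, PySem.List.pyRange_neg_one_cons (by omega)]
    simp only [List.foldl_cons]
    have hcondk := hfeq (k : Int) (by omega) (by omega)
    by_cases hrk : r ≤ (k : Int)
    · have hcond : a * (i - (k:Int) + 1) - (PySem.List.pyGetD psum (i+1) 0 - PySem.List.pyGetD psum (k:Int) 0) ≤ B :=
        hcondk.mpr hrk
      simp only [if_pos hcond]
      rw [ih (by omega) (i - (k:Int) + 1) _ (by omega) (by omega)]
      by_cases hrk1 : r ≤ (k : Int) - 1
      · rw [if_pos hrk1, if_pos hrk, if_neg (Nat.succ_ne_zero k), if_neg (show ¬ k = 0 by omega)]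
        simp only [Prod.mk.injEq]
        exact ⟨trivial, upd_upd p _ _ a (by omega)⟩
      · have hreq : r = (k : Int) := by omega
        subst hreq
        rw [if_neg hrk1, if_pos (le_refl ((k:Nat) : Int)), if_neg (Nat.succ_ne_zero k)]
        rcases Nat.eq_zero_or_pos k with hk0 | hk0
        · subst hk0
          rw [if_pos rfl]
          rfl
        · rw [if_neg (show ¬ k = 0 by omega)]
          simp only [Prod.mk.injEq]
          exact ⟨trivial, upd_upd p _ _ a (le_refl _)⟩
    · have hcond : ¬ (a * (i - (k:Int) + 1) - (PySem.List.pyGetD psum (i+1) 0 - PySem.List.pyGetD psum (k:Int) 0) ≤ B) :=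
        fun h => hrk (hcondk.mp h)
      simp only [if_neg hcond]
      rw [ih (by omega) c _ (by omega) (by omega)]
      rw [if_neg (show ¬ r ≤ (k:Int) - 1 by omega), if_neg hrk, if_neg (Nat.succ_ne_zero k)]
      rcases Nat.eq_zero_or_pos k with hk0 | hk0
      · subst hk0
        rw [if_pos rfl]
        rfl
      · rw [if_neg (show ¬ k = 0 by omega)]
        simp only [Prod.mk.injEq]
        exact ⟨trivial, upd_upd p _ _ a (le_refl _)⟩

theorem solve_eq (A : List Int) (B : Int) (hpre : A ≠ []) : solve A B = solve_alt A B := by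
  have hsne : PySem.List.sorted A (fun x => x) false ≠ [] := by
    intro h
    apply hpre
    have := PySem.List.length_sorted A (fun x => x) false
    rw [h] at this
    exact List.length_eq_zero_iff.mp this.symm
  have hpair : (PySem.List.sorted A (fun x => x) false).Pairwise (· ≤ ·) :=
    PySem.List.sorted_pairwise A (fun x => x)
  simp only [solve, solve_alt]
  rw [psumA_eq _ hsne, psumB_eq, PySem.List.enumerate_eq_map_pyRange _ (0 : Int), List.foldl_map,
    PySem.List.len_eq]
  set s := PySem.List.sorted A (fun x => x) false with hsdef
  set psum := (0 : Int) :: pfx 0 s with hpsumdef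
  rw [PySem.List.foldl_congr_mem _ _
    (fun (ans : Int × Int) (i : Int) =>
      let a := PySem.List.pyGetD s i 0
      let lo := bsGo (i + 1).toNat a B psum i 0 (i + 1)
      let cnt := i - lo + 1
      if cnt > ans.1 then (cnt, a) else ans) _ ?_]
  intro ans i hi
  obtain ⟨hi0, hin⟩ := (PySem.List.mem_pyRange_one).mp hi
  set a := PySem.List.pyGetD s i 0 with hadef
  have mono := wcond_mono s B i hpair hi0 (by simpa using hin)
  set ρ := bsGo (i + 1).toNat a B psum i 0 (i + 1) with hρdef
  obtain ⟨q1, q2, q3, q4⟩ := bsGo_spec a B psum i mono (i + 1).toNat 0 (i + 1)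
    (by omega) le_rfl (by omega) le_rfl
    (fun j hj0 hj1 _ => absurd hj1 (by omega))
    (fun h => absurd h (by omega))
  have hfeq : ∀ j, 0 ≤ j → j ≤ i → (wcond a B psum i j ↔ ρ ≤ j) := by
    intro j hj0 hji
    constructor
    · intro hc
      by_contra hlt
      exact q3 j hj0 (by omega) hc
    · intro hρj
      have hcρ : wcond a B psum i ρ := q4 (by omega)
      have := wcond_upclosed a B psum i mono (j - ρ).toNat ρ q1 (by omega) hcρ
      rwa [show ρ + ((j - ρ).toNat : Int) = j by omega] at this
  have HA := innerA a B psum i ρ q1 hfeq (i + 1).toNat (by omega) 0 ans le_rfl (by omega)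
  rw [show (((i + 1).toNat : Nat) : Int) - 1 = i by omega] at HA
  rw [HA]
  have hcnt : (if ρ ≤ i then i - ρ + 1 else (0 : Int)) = i - ρ + 1 := by
    split_ifs <;> omega
  rw [if_neg (show ¬ (i + 1).toNat = 0 by omega), hcnt]
  rfl

-- ===== VERDICT (by name: the statement is the Claim_ definition above) =====
theorem solve_spec : Claim_equal_solve := by
  intro A B _ hpre
  unfold Spec_solve
  exact solve_eq A B hpre
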